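-- pv_equiv track=rewrite | github.com/IanMendozaJaimes/teoria_computacional | cero_uno/metodos.py | evaluar_cadena
-- ===== SOURCE A (Python) =====
-- def evaluar_cadena(texto):
--     tabla_estados = [[0]]
--     estado = []
--     contador = 0
--     for x in texto:
--         for i in range(len(tabla_estados)):
--             estado = automata(tabla_estados[i][contador], x)
--             if len(estado) == 2:
--                 tabla_estados.append([0] * (contador+1))
--                 tabla_estados[(len(tabla_estados)-1)].append(1)
--                 tabla_estados[i].append(0)
--             elif estado[0] == 2:
--                 tabla_estados[i].append(2)
--             elif estado[0] == -1:
--                 tabla_estados[i].append(-1)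
--             else:
--                 tabla_estados[i].append(0)
--
--         contador += 1
--
--     return tabla_estados
--
-- def automata(estado, letra):
--     if estado == 0:
--         return estado_cero(letra)
--     elif estado  == 1:
--         return estado_uno(letra)
--     elif estado == 2:
--         return estado_dos(letra)
--     else:
--         return [-1]
--
-- def estado_cero(letra):
--     if letra == '0':
--         return [0,1]
--     elif letra == '1':
--         return [1]
--     else:
--         return [-1]
--
-- def estado_uno(letra):
--     if letra == '1':
--         return [2]
--     else:
--         return [-1]
--
-- def estado_dos(letra):
--     if letra != '':
--         return [-1]
--     else:
--         return [2]
-- ===== SOURCE B (Python) =====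
-- def evaluar_cadena(texto):
--     n = len(texto)
--     # k = length of the prefix of '0'/'1' chars; row 0 stays in state 0 there
--     k = 0
--     while k < n and texto[k] in ('0', '1'):
--         k += 1
--     row0 = [0] * (k + 1) + [-1] * (n - k)
--     rows = [row0]
--     for c in range(k):
--         if texto[c] == '0':
--             row = [0] * (c + 1) + [1]
--             if c + 1 < n:
--                 row.append(2 if texto[c + 1] == '1' else -1)
--                 row += [-1] * (n - c - 2)
--             rows.append(row)
--     return rows
-- ===== Notes on version B (the rewrite author's own statement) =====
-- stated objective: faster
-- what changed: Replaces the nested per-character scan over all existing rows (quadratic in the number of spawned rows) by one pass that finds the 0/1-prefix length and then emits row 0 and each spawned row in closed form.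
import Mathlib
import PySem

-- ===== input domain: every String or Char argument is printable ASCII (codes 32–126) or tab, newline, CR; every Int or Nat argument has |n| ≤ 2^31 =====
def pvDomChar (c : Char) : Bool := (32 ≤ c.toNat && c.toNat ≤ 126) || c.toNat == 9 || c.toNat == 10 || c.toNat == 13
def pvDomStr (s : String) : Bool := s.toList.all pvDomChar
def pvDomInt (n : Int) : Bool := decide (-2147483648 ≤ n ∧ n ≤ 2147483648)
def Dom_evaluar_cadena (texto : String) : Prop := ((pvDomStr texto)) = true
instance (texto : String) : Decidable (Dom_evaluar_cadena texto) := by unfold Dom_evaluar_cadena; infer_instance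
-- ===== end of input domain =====

-- B replaces A's per-character rescan of every existing row by one prefix scan plus a closed-form build of each row.

-- ===== PORT A =====
def pvEstadoCero (letra : Char) : List Int :=
  if letra = '0' then [0, 1] else if letra = '1' then [1] else [-1]

def pvEstadoUno (letra : Char) : List Int :=
  if letra = '1' then [2] else [-1]

-- Python compares the character to '' ; a one-character string is never '', so the first branch always fires (exact).
def pvEstadoDos (_letra : Char) : List Int := [-1]

def pvAutomata (estado : Int) (letra : Char) : List Int :=
  if estado = 0 then pvEstadoCero letra
  else if estado = 1 then pvEstadoUno letra
  else if estado = 2 then pvEstadoDos letra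
  else [-1]

-- body of A's inner 'for i in range(len(tabla_estados))' loop; indexing is always in range in A, ported with getD
def pvStepRow (x : Char) (contador : Nat) (tb : List (List Int)) (i : Nat) : List (List Int) :=
  let estado := pvAutomata ((tb.getD i []).getD contador 0) x
  if estado.length = 2 then
    let tb2 := tb ++ [List.replicate (contador + 1) (0 : Int) ++ [1]]
    tb2.set i ((tb2.getD i []) ++ [0])
  else if estado.getD 0 0 = 2 then tb.set i ((tb.getD i []) ++ [2])
  else if estado.getD 0 0 = -1 then tb.set i ((tb.getD i []) ++ [-1])
  else tb.set i ((tb.getD i []) ++ [0])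

def pvInner (x : Char) (contador : Nat) (tb : List (List Int)) : List (List Int) :=
  (List.range tb.length).foldl (pvStepRow x contador) tb

def evaluar_cadena (texto : String) : List (List Int) :=
  (texto.toList.foldl
    (fun (acc : List (List Int) × Nat) x => (pvInner x acc.2 acc.1, acc.2 + 1))
    ([[0]], 0)).1

-- ===== PORT B =====
-- Source B's while loop counting the leading '0'/'1' characters
def pvFindK : List Char → Nat
  | [] => 0
  | c :: rest => if c = '0' ∨ c = '1' then pvFindK rest + 1 else 0

-- Source B's closed-form build of one spawned row
def pvSpawnRow (cs : List Char) (n c : Nat) : List Int :=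
  List.replicate (c + 1) (0 : Int) ++ [1] ++
    (if c + 1 < n then (if cs.getD (c + 1) ' ' = '1' then [2] else [-1]) ++ List.replicate (n - c - 2) (-1)
     else [])

def evaluar_cadena_alt (texto : String) : List (List Int) :=
  let cs := texto.toList
  let n := cs.length
  let k := pvFindK cs
  let row0 := List.replicate (k + 1) (0 : Int) ++ List.replicate (n - k) (-1)
  (List.range k).foldl
    (fun rows c => if cs.getD c ' ' = '0' then rows ++ [pvSpawnRow cs n c] else rows)
    [row0]

-- ===== PRECONDITION & SPEC =====
def Spec_evaluar_cadena (texto : String) (out : List (List Int)) : Prop := out = evaluar_cadena_alt texto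
instance (texto : String) (out : List (List Int)) : Decidable (Spec_evaluar_cadena texto out) := by unfold Spec_evaluar_cadena; infer_instance

-- ===== CLAIM (what is proved, stated in full; the proofs are below) =====
def Claim_equal_evaluar_cadena : Prop := ∀ (texto : String), Dom_evaluar_cadena texto → Spec_evaluar_cadena texto (evaluar_cadena texto)

-- ===== LEMMAS AND PROOFS =====

theorem pv_getD_append_ge {α : Type} (l1 l2 : List α) (n : Nat) (d : α) (h : l1.length ≤ n) :
    (l1 ++ l2).getD n d = l2.getD (n - l1.length) d := by
  induction l1 generalizing n with
  | nil => simp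
  | cons a l1 ih =>
    cases n with
    | zero => simp at h
    | succ n => simpa using ih n (by simpa using h)

theorem pv_getD_append_lt {α : Type} (l1 l2 : List α) (n : Nat) (d : α) (h : n < l1.length) :
    (l1 ++ l2).getD n d = l1.getD n d := by
  induction l1 generalizing n with
  | nil => simp at h
  | cons a l1 ih =>
    cases n with
    | zero => simp
    | succ n => simpa using ih n (by simpa using h)

theorem pv_getD_replicate {α : Type} (n i : Nat) (a d : α) :
    (List.replicate n a).getD i d = if i < n then a else d := by
  rw [List.getD_eq_getElem?_getD, List.getElem?_replicate]
  split <;> simp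

theorem pvSpawnRow_getD (cs : List Char) (j c : Nat) (hc : c < j) :
    (pvSpawnRow cs j c).getD j 0 =
      if c + 1 = j then 1
      else if c + 2 = j then (if cs.getD (c + 1) ' ' = '1' then 2 else -1)
      else -1 := by
  unfold pvSpawnRow
  by_cases h1 : c + 1 = j
  · rw [if_neg (by omega), List.append_nil,
      pv_getD_append_ge _ _ _ _ (by simp; omega)]
    simp [show j - (List.replicate (c+1) (0:Int)).length = 0 by simp; omega, h1]
  · have h2 : c + 1 < j := by omega
    rw [if_pos h2, if_neg h1,
      pv_getD_append_ge _ _ _ _ (by simp; omega)]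
    have hlen : j - (List.replicate (c+1) (0:Int) ++ [1]).length = j - c - 2 + 0 := by simp; omega
    by_cases h3 : cs.getD (c + 1) ' ' = '1' <;> simp only [h3, if_true, if_false]
    · by_cases h4 : c + 2 = j
      · rw [if_pos h4]
        have h5 : j - (List.replicate (c+1) (0:Int) ++ [1]).length = 0 := by simp; omega
        rw [h5]
        simp
      · rw [if_neg h4]
        rw [pv_getD_append_ge _ _ _ _ (by simp; omega)]
        rw [pv_getD_replicate]
        simp only [List.length_append, List.length_replicate, List.length_cons]
        rw [if_pos (by simp; omega)]
    · by_cases h4 : c + 2 = j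
      · rw [if_pos h4]
        have h5 : j - (List.replicate (c+1) (0:Int) ++ [1]).length = 0 := by simp; omega
        rw [h5]
        simp
      · rw [if_neg h4]
        rw [pv_getD_append_ge _ _ _ _ (by simp; omega)]
        rw [pv_getD_replicate]
        simp only [List.length_append, List.length_replicate, List.length_cons]
        rw [if_pos (by simp; omega)]

def pvTr (x : Char) (s : Int) : Int := if s = 1 then (if x = '1' then 2 else -1) else -1

theorem pvSpawnRow_step (cs : List Char) (j c : Nat) (hc : c < j) :
    pvSpawnRow cs j c ++ [pvTr (cs.getD j ' ') ((pvSpawnRow cs j c).getD j (0 : Int))] =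
      pvSpawnRow cs (j + 1) c := by
  rw [pvSpawnRow_getD cs j c hc]
  by_cases h1 : c + 1 = j
  · subst h1
    unfold pvSpawnRow pvTr
    rw [if_neg (by omega), if_pos (by omega)]
    have : c + 1 + 1 - c - 2 = 0 := by omega
    rw [this]
    simp [pvTr, List.getD]
    split <;> rfl
  · have h2 : c + 1 < j := by omega
    rw [if_neg h1]
    have htr : pvTr (cs.getD j ' ')
        (if c + 2 = j then (if cs.getD (c + 1) ' ' = '1' then 2 else -1) else -1) = -1 := by
      unfold pvTr
      rw [if_neg (by split <;> [skip; simp] ; split <;> simp)]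
    rw [htr]
    unfold pvSpawnRow
    simp only [if_pos h2, if_pos (show c + 1 < j + 1 by omega)]
    have : j + 1 - c - 2 = (j - c - 2) + 1 := by omega
    rw [this, List.replicate_succ' (n := j - c - 2)]
    simp

theorem pv_getD_append_length {α : Type} (H : List α) (r : α) (z : List α) (d : α) :
    (H ++ r :: z).getD H.length d = r := by
  induction H with
  | nil => simp
  | cons a H ih => simpa using ih

theorem pv_set_append_length {α : Type} (H : List α) (r v : α) (z : List α) :
    (H ++ r :: z).set H.length v = H ++ v :: z := by
  induction H with
  | nil => simp
  | cons a H ih => simpa using ih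

theorem pv_inner_tail (x : Char) (j : Nat) :
    ∀ (rs H rest : List (List Int)), (∀ r ∈ rs, (r.getD j (0 : Int)) ≠ 0) →
      (List.range' H.length rs.length).foldl (pvStepRow x j) (H ++ (rs ++ rest)) =
        H ++ (rs.map (fun r => r ++ [pvTr x (r.getD j 0)]) ++ rest) := by
  intro rs
  induction rs with
  | nil => intro H rest _; simp
  | cons r rs ih =>
    intro H rest hne
    have hs : r.getD j (0 : Int) ≠ 0 := hne r (by simp)
    have hget : (H ++ (r :: rs ++ rest)).getD H.length [] = r := by
      simpa using pv_getD_append_length H r (rs ++ rest) []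
    have hset : ∀ v : List Int, (H ++ (r :: rs ++ rest)).set H.length v = (H ++ [v]) ++ (rs ++ rest) := by
      intro v
      have := pv_set_append_length H r v (rs ++ rest)
      simpa using this
    have hv : pvStepRow x j (H ++ (r :: rs ++ rest)) H.length
        = (H ++ [r ++ [pvTr x (r.getD j 0)]]) ++ (rs ++ rest) := by
      unfold pvStepRow pvTr
      rw [hget]
      by_cases h1 : r.getD j (0:Int) = 1
      · have he : pvAutomata (r.getD j 0) x = if x = '1' then [2] else [-1] := by
          unfold pvAutomata pvEstadoUno
          rw [if_neg hs, if_pos h1]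
        rw [he, h1]
        by_cases hx : x = '1' <;> simp [hx, hset, h1]
      · have he : pvAutomata (r.getD j 0) x = [-1] := by
          unfold pvAutomata
          rw [if_neg hs, if_neg h1]
          by_cases h2 : r.getD j (0:Int) = 2
          · rw [if_pos h2]; rfl
          · rw [if_neg h2]
        rw [he, if_neg h1]
        simp [hset]
    have hlen : (List.range' H.length (r :: rs).length) =
        H.length :: List.range' (H.length + 1) rs.length := by
      simp [List.range'_succ]
    rw [hlen, List.foldl_cons, hv]
    have := ih (H ++ [r ++ [pvTr x (r.getD j 0)]]) rest
      (fun r' hr' => hne r' (List.mem_cons_of_mem _ hr'))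
    simp only [List.length_append, List.length_cons, List.length_nil, List.append_assoc] at this ⊢
    simpa using this

def pvRow0 (cs : List Char) (j : Nat) : List Int :=
  List.replicate (min (pvFindK cs) j + 1) (0 : Int) ++ List.replicate (j - min (pvFindK cs) j) (-1)

def pvModel (cs : List Char) (j : Nat) : List (List Int) :=
  pvRow0 cs j ::
    ((List.range (min (pvFindK cs) j)).filter (fun c => decide (cs.getD c ' ' = '0'))).map (pvSpawnRow cs j)

theorem pvFindK_le (cs : List Char) : pvFindK cs ≤ cs.length := by
  induction cs with
  | nil => simp [pvFindK]
  | cons c rest ih => simp only [pvFindK]; split <;> simp <;> omega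

theorem pvFindK_char (cs : List Char) (j : Nat) (h : j < pvFindK cs) :
    cs.getD j ' ' = '0' ∨ cs.getD j ' ' = '1' := by
  induction cs generalizing j with
  | nil => simp [pvFindK] at h
  | cons c rest ih =>
    simp only [pvFindK] at h
    split at h
    · cases j with
      | zero => simpa [List.getD]
      | succ j' => simpa [List.getD] using ih j' (by omega)
    · omega

theorem pvFindK_succ (cs : List Char) (j : Nat) (h1 : j ≤ pvFindK cs) (h2 : j < cs.length)
    (h3 : cs.getD j ' ' = '0' ∨ cs.getD j ' ' = '1') : j + 1 ≤ pvFindK cs := by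
  induction cs generalizing j with
  | nil => simp at h2
  | cons c rest ih =>
    cases j with
    | zero =>
      simp only [List.getD_cons_zero] at h3
      simp [pvFindK, h3]
    | succ j' =>
      simp only [pvFindK] at h1 ⊢
      split at h1
      · rename_i hc
        simp only [hc, if_true]
        have := ih j' (by omega) (by simpa using h2) (by simpa [List.getD] using h3)
        omega
      · omega

theorem pvSpawnRow_getD_ne (cs : List Char) (j c : Nat) (hc : c < j) :
    (pvSpawnRow cs j c).getD j 0 ≠ 0 := by
  rw [pvSpawnRow_getD cs j c hc]
  split
  · simp
  · split
    · split <;> simp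
    · simp

theorem pvRow0_getD (cs : List Char) (j : Nat) :
    (pvRow0 cs j).getD j 0 = if min (pvFindK cs) j = j then 0 else -1 := by
  unfold pvRow0
  by_cases h : min (pvFindK cs) j = j
  · rw [if_pos h, h, pv_getD_append_lt _ _ _ _ (by simp), pv_getD_replicate, if_pos (by omega)]
  · have hk : min (pvFindK cs) j < j := by
      have := Nat.min_le_right (pvFindK cs) j
      omega
    rw [if_neg h, pv_getD_append_ge _ _ _ _ (by simp; omega), pv_getD_replicate,
      if_pos (by simp; omega)]

theorem pvSpawns_step (cs : List Char) (j : Nat) (l : List Nat) (hl : ∀ c ∈ l, c < j) :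
    (l.map (pvSpawnRow cs j)).map (fun r => r ++ [pvTr (cs.getD j ' ') (r.getD j 0)]) =
      l.map (pvSpawnRow cs (j + 1)) := by
  rw [List.map_map]
  exact List.map_congr_left (fun c hc => pvSpawnRow_step cs j c (hl c hc))

theorem pvModel_step (cs : List Char) (j : Nat) (hj : j < cs.length) :
    pvInner (cs.getD j ' ') j (pvModel cs j) = pvModel cs (j + 1) := by
  have hkj : min (pvFindK cs) j ≤ j := Nat.min_le_right _ _
  have hmem : ∀ c ∈ (List.range (min (pvFindK cs) j)).filter
      (fun c => decide (cs.getD c ' ' = '0')), c < j := by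
    intro c hc
    have := List.mem_range.mp (List.mem_of_mem_filter hc)
    omega
  have hne : ∀ r ∈ ((List.range (min (pvFindK cs) j)).filter
      (fun c => decide (cs.getD c ' ' = '0'))).map (pvSpawnRow cs j),
      r.getD j (0 : Int) ≠ 0 := by
    intro r hr
    obtain ⟨c, hc, rfl⟩ := List.mem_map.mp hr
    exact pvSpawnRow_getD_ne cs j c (hmem c hc)
  have hlen : List.range (pvModel cs j).length = 0 :: List.range' 1
      (((List.range (min (pvFindK cs) j)).filter
        (fun c => decide (cs.getD c ' ' = '0'))).map (pvSpawnRow cs j)).length := by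
    simp [pvModel, List.range_eq_range', List.range'_succ]
  unfold pvInner
  rw [hlen, List.foldl_cons]
  have hget0 : (pvModel cs j).getD 0 [] = pvRow0 cs j := by simp [pvModel]
  have htail := pv_inner_tail (cs.getD j ' ') j
    (((List.range (min (pvFindK cs) j)).filter
      (fun c => decide (cs.getD c ' ' = '0'))).map (pvSpawnRow cs j))
  by_cases hkeq : min (pvFindK cs) j = j
  · -- row 0 is still in state 0
    have hr0 : (pvRow0 cs j).getD j 0 = 0 := by rw [pvRow0_getD]; simp [hkeq]
    have hjK : j ≤ pvFindK cs := by omega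
    have hrow0 : pvRow0 cs j = List.replicate (j + 1) (0 : Int) := by
      unfold pvRow0
      rw [hkeq]
      simp
    have hspmap := pvSpawns_step cs j _ hmem
    rw [hkeq] at hspmap
    by_cases hx0 : cs.getD j ' ' = '0'
    · -- spawn a new row
      have hx0' : cs[j]?.getD ' ' = '0' := by simpa [List.getD] using hx0
      have hK1 : j + 1 ≤ pvFindK cs := pvFindK_succ cs j hjK hj (Or.inl hx0)
      have hmin1 : min (pvFindK cs) (j + 1) = j + 1 := by omega
      have hstep : pvStepRow (cs.getD j ' ') j (pvModel cs j) 0 =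
          [pvRow0 cs j ++ [0]] ++
            (((List.range (min (pvFindK cs) j)).filter
              (fun c => decide (cs.getD c ' ' = '0'))).map (pvSpawnRow cs j) ++
              [List.replicate (j + 1) (0 : Int) ++ [1]]) := by
        unfold pvStepRow
        rw [hget0, hr0]
        have ha : pvAutomata 0 (cs.getD j ' ') = [0, 1] := by
          unfold pvAutomata pvEstadoCero
          rw [if_pos rfl, if_pos hx0]
        rw [ha]
        simp [pvModel]
      rw [hstep]
      have htail' := htail [pvRow0 cs j ++ [0]] [List.replicate (j + 1) (0 : Int) ++ [1]] hne
      simp only [List.length_cons, List.length_nil, Nat.zero_add] at htail'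
      rw [htail']
      have e0 : pvRow0 cs j ++ [0] = pvRow0 cs (j + 1) := by
        rw [hrow0]
        unfold pvRow0
        rw [hmin1]
        simp [← List.replicate_succ' (n := j + 1)]
      have hfilter : (List.range (j + 1)).filter (fun c => decide (cs.getD c ' ' = '0')) =
          (List.range j).filter (fun c => decide (cs.getD c ' ' = '0')) ++ [j] := by
        rw [List.range_succ, List.filter_append]
        simp [hx0']
      have enew : List.replicate (j + 1) (0 : Int) ++ [1] = pvSpawnRow cs (j + 1) j := by
        simp [pvSpawnRow]
      unfold pvModel
      rw [hmin1, hfilter, List.map_append, e0]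
      simp only [hkeq, enew, List.cons_append, List.nil_append]
      rw [← hspmap]
      simp
    · -- no spawn: row 0 appends 0 (on '1') or -1 (otherwise)
      have hx0' : ¬ cs[j]?.getD ' ' = '0' := by simpa [List.getD] using hx0
      by_cases hx1 : cs.getD j ' ' = '1'
      · -- '1': row 0 appends 0, no new row
        have hK1 : j + 1 ≤ pvFindK cs := pvFindK_succ cs j hjK hj (Or.inr hx1)
        have hmin1 : min (pvFindK cs) (j + 1) = j + 1 := by omega
        have hstep : pvStepRow (cs.getD j ' ') j (pvModel cs j) 0 =
            [pvRow0 cs j ++ [0]] ++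
              (((List.range (min (pvFindK cs) j)).filter
                (fun c => decide (cs.getD c ' ' = '0'))).map (pvSpawnRow cs j) ++ []) := by
          unfold pvStepRow
          rw [hget0, hr0]
          have ha : pvAutomata 0 (cs.getD j ' ') = [1] := by
            unfold pvAutomata pvEstadoCero
            rw [if_pos rfl, if_neg hx0, if_pos hx1]
          rw [ha]
          simp [pvModel]
        rw [hstep]
        have htail' := htail [pvRow0 cs j ++ [0]] [] hne
        simp only [List.length_cons, List.length_nil, Nat.zero_add] at htail'
        rw [htail']
        have e0 : pvRow0 cs j ++ [0] = pvRow0 cs (j + 1) := by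
          rw [hrow0]
          unfold pvRow0
          rw [hmin1]
          simp [← List.replicate_succ' (n := j + 1)]
        have hfilter : (List.range (j + 1)).filter (fun c => decide (cs.getD c ' ' = '0')) =
            (List.range j).filter (fun c => decide (cs.getD c ' ' = '0')) := by
          rw [List.range_succ, List.filter_append]
          simp [hx0']
        unfold pvModel
        rw [hmin1, hfilter, e0]
        simp only [hkeq]
        rw [← hspmap]
        simp
      · -- invalid character: row 0 appends -1
        have hKj : pvFindK cs = j := by
          by_contra h
          have hlt : j < pvFindK cs := by omega
          rcases pvFindK_char cs j hlt with h' | h' <;> [exact hx0 h'; exact hx1 h']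
        have hmin1 : min (pvFindK cs) (j + 1) = j := by omega
        have hstep : pvStepRow (cs.getD j ' ') j (pvModel cs j) 0 =
            [pvRow0 cs j ++ [-1]] ++
              (((List.range (min (pvFindK cs) j)).filter
                (fun c => decide (cs.getD c ' ' = '0'))).map (pvSpawnRow cs j) ++ []) := by
          unfold pvStepRow
          rw [hget0, hr0]
          have ha : pvAutomata 0 (cs.getD j ' ') = [-1] := by
            unfold pvAutomata pvEstadoCero
            rw [if_pos rfl, if_neg hx0, if_neg hx1]
          rw [ha]
          simp [pvModel]
        rw [hstep]
        have htail' := htail [pvRow0 cs j ++ [-1]] [] hne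
        simp only [List.length_cons, List.length_nil, Nat.zero_add] at htail'
        rw [htail']
        have e0 : pvRow0 cs j ++ [-1] = pvRow0 cs (j + 1) := by
          rw [hrow0]
          unfold pvRow0
          rw [hmin1]
          simp [List.replicate]
        unfold pvModel
        rw [hmin1, e0]
        simp only [hkeq]
        rw [← hspmap]
        simp
  · -- row 0 is dead (state -1): appends -1
    have hr0 : (pvRow0 cs j).getD j 0 = -1 := by rw [pvRow0_getD]; simp [hkeq]
    have hKlt : pvFindK cs < j := by omega
    have hmin1 : min (pvFindK cs) (j + 1) = min (pvFindK cs) j := by omega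
    have hstep : pvStepRow (cs.getD j ' ') j (pvModel cs j) 0 =
        [pvRow0 cs j ++ [-1]] ++
          (((List.range (min (pvFindK cs) j)).filter
            (fun c => decide (cs.getD c ' ' = '0'))).map (pvSpawnRow cs j) ++ []) := by
      unfold pvStepRow
      rw [hget0, hr0]
      have ha : pvAutomata (-1) (cs.getD j ' ') = [-1] := by
        simp [pvAutomata]
      rw [ha]
      simp [pvModel]
    rw [hstep]
    have htail' := htail [pvRow0 cs j ++ [-1]] [] hne
    simp only [List.length_cons, List.length_nil, Nat.zero_add] at htail'
    rw [htail']
    have e0 : pvRow0 cs j ++ [-1] = pvRow0 cs (j + 1) := by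
      unfold pvRow0
      rw [hmin1]
      have : j + 1 - min (pvFindK cs) j = (j - min (pvFindK cs) j) + 1 := by omega
      rw [this, List.replicate_succ' (n := j - min (pvFindK cs) j)]
      simp
    unfold pvModel
    rw [hmin1, e0]
    rw [← pvSpawns_step cs j _ hmem]
    simp

theorem pvOuter (cs : List Char) :
    ∀ (suf : List Char) (j : Nat), cs.drop j = suf → j ≤ cs.length →
      (suf.foldl (fun (acc : List (List Int) × Nat) x => (pvInner x acc.2 acc.1, acc.2 + 1))
        (pvModel cs j, j)) = (pvModel cs cs.length, cs.length) := by
  intro suf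
  induction suf with
  | nil =>
    intro j hdrop hle
    have : j = cs.length := by
      have := List.drop_eq_nil_iff.mp hdrop
      omega
    simp [this]
  | cons x suf ih =>
    intro j hdrop hle
    have hj : j < cs.length := by
      by_contra h
      rw [List.drop_eq_nil_of_le (by omega)] at hdrop
      simp at hdrop
    have hx : cs.getD j ' ' = x := by
      have h0 : (cs.drop j)[0]? = some x := by rw [hdrop]; rfl
      rw [List.getElem?_drop] at h0
      simp only [Nat.add_zero] at h0
      simp [List.getD, h0]
    have hdrop' : cs.drop (j + 1) = suf := by
      have : cs.drop (j+1) = (cs.drop j).drop 1 := by rw [List.drop_drop]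
      rw [this, hdrop]; rfl
    simp only [List.foldl_cons]
    rw [← hx, pvModel_step cs j hj]
    exact ih (j + 1) hdrop' (by omega)

theorem pvA_eq_model (texto : String) : evaluar_cadena texto = pvModel texto.toList texto.toList.length := by
  unfold evaluar_cadena
  have h0 : pvModel texto.toList 0 = [[0]] := by
    simp [pvModel, pvRow0]
  rw [← h0, pvOuter texto.toList texto.toList (0) (by simp) (by simp)]

theorem pvB_eq_model (texto : String) : evaluar_cadena_alt texto = pvModel texto.toList texto.toList.length := by
  unfold evaluar_cadena_alt pvModel pvRow0
  have hk : min (pvFindK texto.toList) texto.toList.length = pvFindK texto.toList :=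
    Nat.min_eq_left (pvFindK_le _)
  rw [hk]
  rw [PySem.List.foldl_append_ite (p := fun c => texto.toList.getD c ' ' = '0')
        (f := pvSpawnRow texto.toList texto.toList.length)]
  simp

-- ===== VERDICT (by name: the statement is the Claim_ definition above) =====
theorem evaluar_cadena_spec : Claim_equal_evaluar_cadena := by
  intro texto _
  unfold Spec_evaluar_cadena
  rw [pvA_eq_model, pvB_eq_model]
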